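-- pv_equiv track=rewrite | github.com/Sam-2727/String-Monte-Carlo | covariant formalism/python/ribbon_graph_generator.py | _find_valid_rotations
-- ===== SOURCE A (Python) =====
-- from itertools import permutations, product as iproduct
--
-- def _incident_edges(edges, verts):
--     """Map each vertex to its list of incident edge indices."""
--     inc = {v: [] for v in verts}
--     for i, (a, b) in enumerate(edges):
--         inc[a].append(i)
--         inc[b].append(i)
--     return inc
--
-- def _next_half_edge(frm, to, eidx, edges, rotation):
--     """Navigate to next half-edge in face traversal.
--
--     Arriving at vertex 'to' via edge eidx, find the next edge in the
--     cyclic rotation at 'to', then traverse it away from 'to'.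
--     """
--     rot = rotation[to]
--     pos = rot.index(eidx)
--     nxt = rot[(pos + 1) % len(rot)]
--     a, b = edges[nxt]
--     if a == to:
--         return (to, b, nxt)
--     else:
--         return (to, a, nxt)
--
-- def _count_faces(edges, verts, rotation):
--     """Count faces by tracing half-edge orbits."""
--     visited = set()
--     faces = 0
--     for i, (a, b) in enumerate(edges):
--         for he in [(a, b, i), (b, a, i)]:
--             if he in visited:
--                 continue
--             faces += 1
--             cur = he
--             while cur not in visited:
--                 visited.add(cur)
--                 cur = _next_half_edge(*cur, edges, rotation)
--     return faces
--
-- def _find_valid_rotations(edges, verts, target_faces):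
--     """Find all rotation systems yielding the target face count."""
--     inc = _incident_edges(edges, verts)
--     vert_perms = []
--     for v in verts:
--         # Cyclic rotations define the same local ribbon structure.
--         # Keep one representative per cyclic class by fixing first edge.
--         fixed_first = min(inc[v])
--         reps = [list(p) for p in permutations(inc[v]) if p[0] == fixed_first]
--         vert_perms.append(reps)
--
--     results = []
--     for combo in iproduct(*vert_perms):
--         rotation = {verts[i]: list(combo[i]) for i in range(len(verts))}
--         if _count_faces(edges, verts, rotation) == target_faces:
--             results.append((edges, verts, rotation))
--     return results
-- ===== SOURCE B (Python) =====
-- from itertools import permutations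
--
-- def _incident(edges, verts):
--     inc = {v: [] for v in verts}
--     for i, (a, b) in enumerate(edges):
--         inc[a].append(i)
--         inc[b].append(i)
--     return inc
--
-- def _orbit(he, edges, rotation):
--     """Full forward orbit of one half-edge under the face-successor map,
--     computed independently of any other half-edge."""
--     seen = set()
--     cur = he
--     while cur not in seen:
--         seen.add(cur)
--         frm, to, e = cur
--         rot = rotation[to]
--         nxt = rot[(rot.index(e) + 1) % len(rot)]
--         a, b = edges[nxt]
--         cur = (to, b if a == to else a, nxt)
--     return seen
--
-- def _count_faces_b(edges, rotation):
--     """Faces = half-edges not reachable from any earlier half-edge: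
--     precompute every half-edge's orbit, then count by pairwise membership."""
--     hes = [he for i, (a, b) in enumerate(edges) for he in ((a, b, i), (b, a, i))]
--     orbits = [_orbit(he, edges, rotation) for he in hes]
--     faces = 0
--     for i, he in enumerate(hes):
--         if all(he not in orbits[j] for j in range(i)):
--             faces += 1
--     return faces
--
-- def _find_valid_rotations(edges, verts, target_faces):
--     """Find all rotation systems yielding the target face count."""
--     inc = _incident(edges, verts)
--     vert_perms = []
--     for v in verts:
--         fixed_first = min(inc[v])
--         vert_perms.append([list(p) for p in permutations(inc[v]) if p[0] == fixed_first])
--     results = []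
--     rotation = {}
--     def assign(k):
--         if k == len(verts):
--             if _count_faces_b(edges, rotation) == target_faces:
--                 results.append((edges, verts, dict(rotation)))
--             return
--         for rep in vert_perms[k]:
--             rotation[verts[k]] = list(rep)
--             assign(k + 1)
--     assign(0)
--     return results
-- ===== Notes on version B (the rewrite author's own statement) =====
-- stated objective: alternative
-- what changed: B replaces both phases: the candidate rotations are enumerated by a recursive depth-first assignment over the vertices (one shared rotation dict, no itertools.product), and faces are counted without any shared visited set: every half-edge's forward orbit under the face-successor map is computed independently, and the face count is the number of half-edges that lie in no earlier half-edge's orbit.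
import Mathlib
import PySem

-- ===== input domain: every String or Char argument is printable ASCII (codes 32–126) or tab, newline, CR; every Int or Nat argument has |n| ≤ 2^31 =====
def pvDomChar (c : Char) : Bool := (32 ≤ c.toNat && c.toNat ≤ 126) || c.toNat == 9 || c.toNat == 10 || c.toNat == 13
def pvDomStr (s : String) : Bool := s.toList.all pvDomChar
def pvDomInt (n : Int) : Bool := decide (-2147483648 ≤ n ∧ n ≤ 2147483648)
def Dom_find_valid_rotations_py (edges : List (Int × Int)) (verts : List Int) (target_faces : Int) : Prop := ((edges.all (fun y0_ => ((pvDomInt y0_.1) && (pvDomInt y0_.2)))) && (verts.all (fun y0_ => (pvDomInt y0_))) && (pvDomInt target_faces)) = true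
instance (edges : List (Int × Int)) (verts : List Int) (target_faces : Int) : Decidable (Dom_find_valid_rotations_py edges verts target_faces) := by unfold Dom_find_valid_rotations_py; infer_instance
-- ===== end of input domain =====

-- B enumerates candidate rotations by recursive depth-first assignment over the vertices (no
-- itertools.product) and counts faces without a shared visited set: every half-edge's forward
-- orbit under the face-successor map is computed independently and a face is counted for every
-- half-edge lying in no earlier half-edge's orbit (objective: alternative).
-- ===== PORT A =====
-- itertools.product and the _incident_edges helper (the incidence code is identical in both Pythons)
def pyProduct {α : Type} : List (List α) → List (List α)
  | [] => [[]]
  | l :: ls => l.flatMap (fun x => (pyProduct ls).map (fun rest => x :: rest))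

def incident_edges (edges : List (Int × Int)) (verts : List Int) : PySem.Dict Int (List Int) :=
  let inc := verts.foldl (fun d v => d.insert v ([] : List Int)) PySem.Dict.empty
  (PySem.List.enumerate edges).foldl (fun inc p =>
    let inc := inc.modify p.2.1 [] (fun l => l ++ [p.1])
    inc.modify p.2.2 [] (fun l => l ++ [p.1])) inc

-- _next_half_edge: arriving at `to` via edge eidx, step to the next half-edge
def next_half_edge (frm tov eidx : Int) (edges : List (Int × Int))
    (rotation : PySem.Dict Int (List Int)) : Int × Int × Int :=
  let rot := rotation.getD tov []
  let pos : Int := ((PySem.List.index? rot eidx).map Int.ofNat).getD 0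
  let nxt := (PySem.List.pyGet? rot (PySem.Int.mod (pos + 1) (rot.length : Int))).getD 0
  match PySem.List.pyGet? edges nxt with
  | some ab => if ab.1 = tov then (tov, ab.2, nxt) else (tov, ab.1, nxt)
  | none => (tov, 0, nxt)

-- the inner `while cur not in visited` loop of _count_faces (fuel 2*len(edges)+1 always suffices:
-- every iteration adds a fresh half-edge to visited and at most 2*len(edges) half-edges exist)
def walk_face (edges : List (Int × Int)) (rotation : PySem.Dict Int (List Int)) :
    Nat → PySem.Set (Int × Int × Int) → (Int × Int × Int) → PySem.Set (Int × Int × Int)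
  | 0, visited, _ => visited
  | fuel + 1, visited, cur =>
    if cur ∈ visited then visited
    else walk_face edges rotation fuel (PySem.Set.add visited cur)
      (next_half_edge cur.1 cur.2.1 cur.2.2 edges rotation)

def count_faces (edges : List (Int × Int)) (verts : List Int)
    (rotation : PySem.Dict Int (List Int)) : Int :=
  let st := (PySem.List.enumerate edges).foldl (fun st p =>
    [(p.2.1, p.2.2, p.1), (p.2.2, p.2.1, p.1)].foldl (fun st he =>
      if he ∈ st.1 then st
      else (walk_face edges rotation (2 * edges.length + 1) st.1 he, st.2 + 1)) st)
    ((PySem.Set.empty : PySem.Set (Int × Int × Int)), (0 : Int))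
  st.2

def find_valid_rotations_py (edges : List (Int × Int)) (verts : List Int) (target_faces : Int) :
    List ((List (Int × Int)) × List Int × (List (Int × List Int))) :=
  let inc := incident_edges edges verts
  let vert_perms := verts.foldl (fun acc v =>
    let incv := inc.getD v []
    let fixed_first := (PySem.List.min? incv (fun x => x)).getD 0
    let reps := (PySem.List.permutations incv incv.length).filter
      (fun p => (PySem.List.pyGet? p 0).getD 0 == fixed_first)
    acc ++ [reps]) []
  (pyProduct vert_perms).foldl (fun results combo =>
    let rotation := (PySem.List.pyRange 0 (verts.length : Int) 1).foldl (fun d i =>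
      d.insert (PySem.List.pyGetD verts i 0) (PySem.List.pyGetD combo i [])) PySem.Dict.empty
    if count_faces edges verts rotation == target_faces then
      results ++ [(edges, verts, rotation.items)]
    else results) []

-- ===== PORT B =====
-- one step of the face-successor map, as computed inline in _orbit
def orbit_step (edges : List (Int × Int)) (rotation : PySem.Dict Int (List Int))
    (cur : Int × Int × Int) : Int × Int × Int :=
  let rot := rotation.getD cur.2.1 []
  let pos : Int := ((PySem.List.index? rot cur.2.2).map Int.ofNat).getD 0
  let nxt := (PySem.List.pyGet? rot (PySem.Int.mod (pos + 1) (rot.length : Int))).getD 0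
  let ab := (PySem.List.pyGet? edges nxt).getD (0, 0)
  (cur.2.1, if ab.1 = cur.2.1 then ab.2 else ab.1, nxt)

-- _orbit's `while cur not in seen` loop (fuel 2*len(edges)+1 always suffices: every iteration
-- adds a fresh half-edge to seen and at most 2*len(edges) half-edges exist)
def orbit_walk (edges : List (Int × Int)) (rotation : PySem.Dict Int (List Int)) :
    Nat → PySem.Set (Int × Int × Int) → (Int × Int × Int) → PySem.Set (Int × Int × Int)
  | 0, seen, _ => seen
  | fuel + 1, seen, cur =>
    if cur ∈ seen then seen
    else orbit_walk edges rotation fuel (PySem.Set.add seen cur) (orbit_step edges rotation cur)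

def count_faces_b (edges : List (Int × Int)) (rotation : PySem.Dict Int (List Int)) : Int :=
  let hes := (PySem.List.enumerate edges).flatMap
    (fun p => [(p.2.1, p.2.2, p.1), (p.2.2, p.2.1, p.1)])
  let orbits := hes.map (fun he =>
    orbit_walk edges rotation (2 * edges.length + 1) PySem.Set.empty he)
  (PySem.List.enumerate hes).foldl (fun faces p =>
    if (PySem.List.pyRange 0 p.1 1).all
        (fun j => !(PySem.Set.contains (PySem.List.pyGetD orbits j PySem.Set.empty) p.2))
    then faces + 1 else faces) 0

-- the recursive `assign(k)` of B, structurally recursing on the (vertex, reps) pairs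
def b_assign (edges : List (Int × Int)) (verts : List Int) (target_faces : Int) :
    List (Int × List (List Int)) → PySem.Dict Int (List Int) →
    List ((List (Int × Int)) × List Int × (List (Int × List Int))) →
    List ((List (Int × Int)) × List Int × (List (Int × List Int)))
  | [], rotation, results =>
    if count_faces_b edges rotation == target_faces then
      results ++ [(edges, verts, rotation.items)]
    else results
  | (v, reps) :: rest, rotation, results =>
    reps.foldl (fun res rep => b_assign edges verts target_faces rest (rotation.insert v rep) res)
      results

def find_valid_rotations_py_alt (edges : List (Int × Int)) (verts : List Int) (target_faces : Int) :
    List ((List (Int × Int)) × List Int × (List (Int × List Int))) :=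
  let inc := incident_edges edges verts
  let vert_perms := verts.foldl (fun acc v =>
    let incv := inc.getD v []
    let fixed_first := (PySem.List.min? incv (fun x => x)).getD 0
    let reps := (PySem.List.permutations incv incv.length).filter
      (fun p => (PySem.List.pyGet? p 0).getD 0 == fixed_first)
    acc ++ [reps]) []
  b_assign edges verts target_faces (verts.zip vert_perms) PySem.Dict.empty []

-- ===== PRECONDITION & SPEC =====
-- Pre_ excludes exactly the inputs on which the Python raises: an edge endpoint not in verts
-- (KeyError in the incidence builder) or a vertex with no incident edge (ValueError from min([])).
def Pre_find_valid_rotations_py (edges : List (Int × Int)) (verts : List Int) (target_faces : Int) : Prop :=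
  (∀ e ∈ edges, e.1 ∈ verts ∧ e.2 ∈ verts) ∧ (∀ v ∈ verts, ∃ e ∈ edges, e.1 = v ∨ e.2 = v)

instance (edges : List (Int × Int)) (verts : List Int) (target_faces : Int) :
    Decidable (Pre_find_valid_rotations_py edges verts target_faces) := by
  unfold Pre_find_valid_rotations_py; infer_instance

def pvWitness_find_valid_rotations_py : (List (Int × Int)) × List Int × Int := ([(1, 2)], [1, 2], 1)

def Spec_find_valid_rotations_py (edges : List (Int × Int)) (verts : List Int) (target_faces : Int)
    (out : List ((List (Int × Int)) × List Int × (List (Int × List Int)))) : Prop :=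
  out = find_valid_rotations_py_alt edges verts target_faces

instance (edges : List (Int × Int)) (verts : List Int) (target_faces : Int)
    (out : List ((List (Int × Int)) × List Int × (List (Int × List Int)))) :
    Decidable (Spec_find_valid_rotations_py edges verts target_faces out) := by
  unfold Spec_find_valid_rotations_py; infer_instance

-- ===== CLAIM (what is proved, stated in full; the proofs are below) =====
def Claim_equal_find_valid_rotations_py : Prop := ∀ (edges : List (Int × Int)) (verts : List Int) (target_faces : Int), Dom_find_valid_rotations_py edges verts target_faces → Pre_find_valid_rotations_py edges verts target_faces → Spec_find_valid_rotations_py edges verts target_faces (find_valid_rotations_py edges verts target_faces)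

-- ===== LEMMAS AND PROOFS =====

-- proof-side abbreviations
def heList (edges : List (Int × Int)) : List (Int × Int × Int) :=
  (PySem.List.enumerate edges).flatMap (fun p => [(p.2.1, p.2.2, p.1), (p.2.2, p.2.1, p.1)])

def incPairs (edges : List (Int × Int)) : List (Int × Int) :=
  (PySem.List.enumerate edges).flatMap (fun p => [(p.2.1, p.1), (p.2.2, p.1)])

def incOf (edges : List (Int × Int)) (v : Int) : List Int :=
  ((incPairs edges).filter (fun q => q.1 == v)).map (fun q => q.2)

-- every rotation the enumeration ever tests satisfies this at the vertices half-edges arrive at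
def GoodRot (edges : List (Int × Int)) (rotation : PySem.Dict Int (List Int)) : Prop :=
  ∀ he ∈ heList edges, ∃ rot, rotation.get? he.2.1 = some rot ∧ rot.Perm (incOf edges he.2.1)

def nextF (edges : List (Int × Int)) (rotation : PySem.Dict Int (List Int))
    (he : Int × Int × Int) : Int × Int × Int :=
  next_half_edge he.1 he.2.1 he.2.2 edges rotation

-- the common shape of the two while-loops (A's global trace, B's per-half-edge orbit)
def pvWalk (next : (Int × Int × Int) → (Int × Int × Int)) :
    Nat → PySem.Set (Int × Int × Int) → (Int × Int × Int) → PySem.Set (Int × Int × Int)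
  | 0, visited, _ => visited
  | fuel + 1, visited, cur =>
    if cur ∈ visited then visited
    else pvWalk next fuel (PySem.Set.add visited cur) (next cur)

theorem orbit_step_eq_nextF (edges : List (Int × Int)) (rotation : PySem.Dict Int (List Int))
    (cur : Int × Int × Int) : orbit_step edges rotation cur = nextF edges rotation cur := by
  unfold orbit_step nextF next_half_edge
  dsimp only
  cases hg : PySem.List.pyGet? edges ((PySem.List.pyGet? (rotation.getD cur.2.1 [])
      (PySem.Int.mod ((((PySem.List.index? (rotation.getD cur.2.1 []) cur.2.2).map Int.ofNat).getD 0) + 1)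
        (((rotation.getD cur.2.1 []).length : Int)))).getD 0) with
  | none => simp
  | some ab => by_cases hab : ab.1 = cur.2.1 <;> simp [hab]

theorem walk_face_eq_pvWalk (edges : List (Int × Int)) (rotation : PySem.Dict Int (List Int)) :
    ∀ (f : Nat) (v : PySem.Set (Int × Int × Int)) (c : Int × Int × Int),
      walk_face edges rotation f v c = pvWalk (nextF edges rotation) f v c := by
  intro f
  induction f with
  | zero => intro v c; rfl
  | succ f ih => intro v c; simp only [walk_face, pvWalk, nextF, ih]

theorem orbit_walk_eq_pvWalk (edges : List (Int × Int)) (rotation : PySem.Dict Int (List Int)) :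
    ∀ (f : Nat) (v : PySem.Set (Int × Int × Int)) (c : Int × Int × Int),
      orbit_walk edges rotation f v c = pvWalk (nextF edges rotation) f v c := by
  intro f
  induction f with
  | zero => intro v c; rfl
  | succ f ih => intro v c; simp only [orbit_walk, pvWalk, orbit_step_eq_nextF, ih]

def pvMeas (S : List (Int × Int × Int)) (v : PySem.Set (Int × Int × Int)) : Nat :=
  ((PySem.List.dedup S).filter (fun x => !(PySem.Set.contains v x))).length

theorem pvMeas_le (S : List (Int × Int × Int)) (v : PySem.Set (Int × Int × Int)) :
    pvMeas S v ≤ (PySem.List.dedup S).length :=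
  List.length_filter_le _ _

theorem contains_eq_decide_mem {α : Type} [BEq α] [LawfulBEq α] (s : PySem.Set α) (x : α) :
    PySem.Set.contains s x = decide (x ∈ s) := by
  cases h : PySem.Set.contains s x with
  | true => exact (by simp [PySem.Set.contains_iff s x |>.1 h])
  | false =>
    by_cases hm : x ∈ s
    · rw [← PySem.Set.contains_iff s x] at hm; rw [hm] at h; cases h
    · simp [hm]

theorem pvMeas_add_lt (S : List (Int × Int × Int)) (v : PySem.Set (Int × Int × Int))
    (c : Int × Int × Int) (hc : c ∈ S) (hcv : c ∉ v) :
    pvMeas S (PySem.Set.add v c) < pvMeas S v := by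
  unfold pvMeas
  simp only [contains_eq_decide_mem]
  have hsub : ∀ x : Int × Int × Int,
      (!(decide (x ∈ PySem.Set.add v c))) =
        ((!(decide (x ∈ PySem.Set.add v c))) && (!(decide (x ∈ v)))) := by
    intro x
    by_cases hx : x ∈ PySem.Set.add v c
    · simp [hx]
    · have hxv : x ∉ v := fun h => hx ((PySem.Set.mem_add v c x).2 (Or.inl h))
      simp [hx, hxv]
  rw [List.filter_congr (fun x _ => hsub x), ← List.filter_filter]
  apply List.length_filter_lt_length_iff_exists.2
  refine ⟨c, ?_, ?_⟩
  · rw [List.mem_filter]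
    refine ⟨?_, by simp [hcv]⟩
    rw [PySem.List.dedup_eq_ofList, PySem.Set.mem_ofList]; exact hc
  · have : c ∈ PySem.Set.add v c := (PySem.Set.mem_add v c c).2 (Or.inr rfl)
    simp [this]

-- iterating a function that preserves a closed set stays inside it
theorem iterate_mem_closed (f : (Int × Int × Int) → (Int × Int × Int))
    (V : PySem.Set (Int × Int × Int)) (h : ∀ x ∈ V, f x ∈ V) (x : Int × Int × Int)
    (hx : x ∈ V) : ∀ k : Nat, f^[k] x ∈ V := by
  intro k
  induction k with
  | zero => exact hx
  | succ k ih => rw [Function.iterate_succ_apply']; exact h _ ih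

-- everything the walk collects is initial or a forward iterate of the start
theorem pvWalk_subset (f : (Int × Int × Int) → (Int × Int × Int)) :
    ∀ (fuel : Nat) (V : PySem.Set (Int × Int × Int)) (c x : Int × Int × Int),
      x ∈ pvWalk f fuel V c → x ∈ V ∨ ∃ k : Nat, f^[k] c = x := by
  intro fuel
  induction fuel with
  | zero => intro V c x hx; exact Or.inl hx
  | succ fuel ih =>
    intro V c x hx
    simp only [pvWalk] at hx
    by_cases hc : c ∈ V
    · rw [if_pos hc] at hx; exact Or.inl hx
    · rw [if_neg hc] at hx
      rcases ih _ _ _ hx with h | ⟨k, hk⟩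
      · rcases (PySem.Set.mem_add V c x).1 h with h' | h'
        · exact Or.inl h'
        · exact Or.inr ⟨0, h'.symm⟩
      · exact Or.inr ⟨k + 1, by rw [Function.iterate_succ_apply]; exact hk⟩

-- with enough fuel the walk result contains its inputs and is closed under the step
theorem pvWalk_closed (f : (Int × Int × Int) → (Int × Int × Int))
    (S : List (Int × Int × Int)) (hS : ∀ x ∈ S, f x ∈ S) :
    ∀ (fuel : Nat) (V : PySem.Set (Int × Int × Int)) (c : Int × Int × Int),
      c ∈ S → (∀ x ∈ V, f x ∈ V ∨ f x = c) → pvMeas S V < fuel →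
      (∀ x, x ∈ V ∨ x = c → x ∈ pvWalk f fuel V c) ∧
        (∀ x ∈ pvWalk f fuel V c, f x ∈ pvWalk f fuel V c) := by
  intro fuel
  induction fuel with
  | zero => intro V c _ _ hf; omega
  | succ fuel ih =>
    intro V c hc hV hf
    simp only [pvWalk]
    by_cases hcv : c ∈ V
    · rw [if_pos hcv] at *
      refine ⟨?_, ?_⟩
      · intro x hx; rcases hx with h | h; exact h; exact h ▸ hcv
      · intro x hx
        rcases hV x hx with h | h
        · exact h
        · exact h ▸ hcv
    · rw [if_neg hcv]
      have hV' : ∀ x ∈ PySem.Set.add V c, f x ∈ PySem.Set.add V c ∨ f x = f c := by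
        intro x hx
        rcases (PySem.Set.mem_add V c x).1 hx with h | h
        · rcases hV x h with h' | h'
          · exact Or.inl ((PySem.Set.mem_add V c (f x)).2 (Or.inl h'))
          · exact Or.inl ((PySem.Set.mem_add V c (f x)).2 (Or.inr h'))
        · exact Or.inr (by rw [h])
      have hm := pvMeas_add_lt S V c hc hcv
      obtain ⟨h1, h2⟩ := ih (PySem.Set.add V c) (f c) (hS c hc) hV' (by omega)
      refine ⟨?_, h2⟩
      intro x hx
      apply h1
      left
      rcases hx with h | h
      · exact (PySem.Set.mem_add V c x).2 (Or.inl h)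
      · exact (PySem.Set.mem_add V c x).2 (Or.inr h)

-- full characterization of the walk's result
theorem mem_pvWalk_iff (f : (Int × Int × Int) → (Int × Int × Int))
    (S : List (Int × Int × Int)) (hS : ∀ x ∈ S, f x ∈ S)
    (fuel : Nat) (V : PySem.Set (Int × Int × Int)) (c : Int × Int × Int)
    (hc : c ∈ S) (hV : ∀ x ∈ V, f x ∈ V ∨ f x = c) (hf : pvMeas S V < fuel)
    (x : Int × Int × Int) :
    x ∈ pvWalk f fuel V c ↔ x ∈ V ∨ ∃ k : Nat, f^[k] c = x := by
  constructor
  · exact pvWalk_subset f fuel V c x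
  · intro hx
    obtain ⟨h1, h2⟩ := pvWalk_closed f S hS fuel V c hc hV hf
    rcases hx with h | ⟨k, rfl⟩
    · exact h1 x (Or.inl h)
    · exact iterate_mem_closed f _ h2 c (h1 c (Or.inr rfl)) k

-- the common counting scheme both face counters reduce to: walk the half-edges in order,
-- counting those lying in no earlier half-edge's orbit set
def cspec (orb : (Int × Int × Int) → PySem.Set (Int × Int × Int)) :
    List (Int × Int × Int) → List (Int × Int × Int) → Int
  | _, [] => 0
  | pref, h :: t =>
    (if pref.all (fun p => !(PySem.Set.contains (orb p) h)) then 1 else 0) +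
      cspec orb (pref ++ [h]) t

theorem all_congr_mem {α : Type} (l : List α) (p q : α → Bool) (h : ∀ x ∈ l, p x = q x) :
    l.all p = l.all q := by
  induction l with
  | nil => rfl
  | cons a t ih => simp only [List.all_cons, h a (by simp), ih (fun x hx => h x (by simp [hx]))]

-- A's visited-set fold computes cspec
theorem a_fold_eq_cspec (f : (Int × Int × Int) → (Int × Int × Int))
    (S : List (Int × Int × Int)) (hS : ∀ x ∈ S, f x ∈ S) (fuel : Nat)
    (hfuel : (PySem.List.dedup S).length < fuel) :
    ∀ (l pref : List (Int × Int × Int)) (V : PySem.Set (Int × Int × Int)) (n : Int),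
      (∀ x ∈ l, x ∈ S) → (∀ x ∈ V, f x ∈ V) →
      (∀ x, x ∈ V ↔ ∃ p ∈ pref, x ∈ pvWalk f fuel PySem.Set.empty p) →
      (l.foldl (fun st he => if he ∈ st.1 then st else (pvWalk f fuel st.1 he, st.2 + 1))
          (V, n)).2 = n + cspec (fun p => pvWalk f fuel PySem.Set.empty p) pref l := by
  intro l
  induction l with
  | nil => intro pref V n _ _ _; simp [cspec]
  | cons h t ih =>
    intro pref V n hl hVc hinv
    have hhS : h ∈ S := hl h (by simp)
    have hmeasV : pvMeas S V < fuel := lt_of_le_of_lt (pvMeas_le S V) hfuel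
    have hmeasE : pvMeas S (PySem.Set.empty : PySem.Set (Int × Int × Int)) < fuel :=
      lt_of_le_of_lt (pvMeas_le S _) hfuel
    have horb : ∀ p ∈ S, ∀ x, x ∈ pvWalk f fuel PySem.Set.empty p ↔ ∃ k : Nat, f^[k] p = x := by
      intro p hp x
      rw [mem_pvWalk_iff f S hS fuel PySem.Set.empty p hp (by intro y hy; cases hy) hmeasE]
      simp
    simp only [List.foldl_cons, cspec]
    by_cases hv : h ∈ V
    · rw [if_pos hv]
      have hex : ∃ p ∈ pref, h ∈ pvWalk f fuel PySem.Set.empty p := (hinv h).1 hv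
      have hcond : pref.all (fun p => !(PySem.Set.contains (pvWalk f fuel PySem.Set.empty p) h))
          = false := by
        obtain ⟨p, hp, hm⟩ := hex
        rw [List.all_eq_false]
        refine ⟨p, hp, ?_⟩
        simp only [contains_eq_decide_mem]
        simp only [hm, decide_true, Bool.not_true, Bool.false_eq_true, not_false_eq_true]
      rw [hcond]
      simp only [Bool.false_eq_true, if_false, zero_add]
      -- the rewrite by ih below closes the goal
      have hinv' : ∀ x, x ∈ V ↔ ∃ p ∈ pref ++ [h], x ∈ pvWalk f fuel PySem.Set.empty p := by
        intro x
        constructor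
        · intro hx
          obtain ⟨p, hp, hm⟩ := (hinv x).1 hx
          exact ⟨p, List.mem_append.2 (Or.inl hp), hm⟩
        · rintro ⟨p, hp, hm⟩
          rcases List.mem_append.1 hp with hp | hp
          · exact (hinv x).2 ⟨p, hp, hm⟩
          · simp only [List.mem_singleton] at hp
            subst hp
            rcases pvWalk_subset f fuel _ p x hm with hx | ⟨k, rfl⟩
            · cases hx
            · exact iterate_mem_closed f V hVc p hv k
      rw [ih (pref ++ [h]) V n (fun x hx => hl x (by simp [hx])) hVc hinv']
    · rw [if_neg hv]
      have hcond : pref.all (fun p => !(PySem.Set.contains (pvWalk f fuel PySem.Set.empty p) h))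
          = true := by
        rw [List.all_eq_true]
        intro p hp
        by_cases hm : h ∈ pvWalk f fuel PySem.Set.empty p
        · exact absurd ((hinv h).2 ⟨p, hp, hm⟩) hv
        · rw [contains_eq_decide_mem, decide_eq_false hm]
          rfl
      rw [hcond]
      simp only [if_true]
      have hweak : ∀ x ∈ V, f x ∈ V ∨ f x = h := fun x hx => Or.inl (hVc x hx)
      obtain ⟨hw1, hw2⟩ := pvWalk_closed f S hS fuel V h hhS hweak hmeasV
      have hinv' : ∀ x, x ∈ pvWalk f fuel V h ↔
          ∃ p ∈ pref ++ [h], x ∈ pvWalk f fuel PySem.Set.empty p := by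
        intro x
        rw [mem_pvWalk_iff f S hS fuel V h hhS hweak hmeasV]
        constructor
        · intro hx
          rcases hx with hx | ⟨k, hk⟩
          · obtain ⟨p, hp, hm⟩ := (hinv x).1 hx
            exact ⟨p, List.mem_append.2 (Or.inl hp), hm⟩
          · exact ⟨h, List.mem_append.2 (Or.inr (by simp)),
              (horb h hhS x).2 ⟨k, hk⟩⟩
        · rintro ⟨p, hp, hm⟩
          rcases List.mem_append.1 hp with hp | hp
          · exact Or.inl ((hinv x).2 ⟨p, hp, hm⟩)
          · simp only [List.mem_singleton] at hp
            subst hp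
            exact Or.inr ((horb p hhS x).1 hm)
      rw [ih (pref ++ [h]) (pvWalk f fuel V h) (n + 1) (fun x hx => hl x (by simp [hx])) hw2 hinv']
      omega

-- B's enumerate/range fold computes cspec
theorem b_fold_eq_cspec (orb : (Int × Int × Int) → PySem.Set (Int × Int × Int))
    (hes : List (Int × Int × Int)) :
    ∀ (t pref : List (Int × Int × Int)) (acc : Int), hes = pref ++ t →
      (PySem.List.enumerate t (pref.length : Int)).foldl (fun faces p =>
        if (PySem.List.pyRange 0 p.1 1).all
            (fun j => !(PySem.Set.contains
              (PySem.List.pyGetD (hes.map orb) j PySem.Set.empty) p.2))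
        then faces + 1 else faces) acc = acc + cspec orb pref t := by
  intro t
  induction t with
  | nil => intro pref acc _; simp [cspec, PySem.List.enumerate_nil]
  | cons h t ih =>
    intro pref acc hsplit
    subst hsplit
    rw [PySem.List.enumerate_cons, List.foldl_cons]
    have hlen : pref.length ≤ (pref ++ h :: t).length := by
      rw [List.length_append, List.length_cons]; omega
    have hcond : (PySem.List.pyRange 0 ((pref.length : Nat) : Int) 1).all
        (fun j => !(PySem.Set.contains
          (PySem.List.pyGetD ((pref ++ h :: t).map orb) j PySem.Set.empty) h)) =
        pref.all (fun p => !(PySem.Set.contains (orb p) h)) := by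
      have hmap : pref.all (fun p => !(PySem.Set.contains (orb p) h)) =
          ((PySem.List.pyRange 0 ((pref.length : Nat) : Int) 1).map
            (fun j => PySem.List.pyGetD pref j (0, 0, 0))).all
            (fun p => !(PySem.Set.contains (orb p) h)) := by
        rw [PySem.List.map_pyGetD_pyRange_zero']
      rw [hmap, List.all_map]
      apply all_congr_mem
      intro j hj
      rw [PySem.List.mem_pyRange_one] at hj
      have hj0 : 0 ≤ j := hj.1
      have hjlt : j.toNat < pref.length := by omega
      have hjlt2 : j.toNat < ((pref ++ h :: t).map orb).length := by
        rw [List.length_map]; omega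
      have h1 : PySem.List.pyGetD ((pref ++ h :: t).map orb) j PySem.Set.empty = ((pref ++ h :: t).map orb)[j.toNat] :=
        PySem.List.pyGetD_eq_getElem _ _ hj0 (by rw [List.length_map]; push_cast; omega)
      have h2 : PySem.List.pyGetD pref j (0, 0, 0) = pref[j.toNat] :=
        PySem.List.pyGetD_eq_getElem _ _ hj0 (by push_cast; omega)
      simp only [Function.comp_apply]
      rw [h1, h2, List.getElem_map]
      exact congrArg (fun z => !(PySem.Set.contains (orb z) h)) (List.getElem_append_left hjlt)
    rw [hcond]
    have hsplit' : pref ++ h :: t = (pref ++ [h]) ++ t := by rw [List.append_assoc]; rfl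
    have hlen' : ((pref ++ [h]).length : Int) = (pref.length : Int) + 1 := by
      rw [List.length_append, List.length_singleton]; push_cast; ring
    by_cases hc : pref.all (fun p => !(PySem.Set.contains (orb p) h)) = true
    · rw [if_pos hc]
      have := ih (pref ++ [h]) (acc + 1) hsplit'
      rw [hlen'] at this
      rw [this, cspec, hc, if_pos rfl]
      ring
    · rw [if_neg hc]
      have := ih (pref ++ [h]) acc hsplit'
      rw [hlen'] at this
      rw [this, cspec]
      rw [Bool.not_eq_true] at hc
      rw [hc]
      simp only [Bool.false_eq_true, if_false]
      ring

-- membership characterizations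
theorem mem_heList (edges : List (Int × Int)) (he : Int × Int × Int) :
    he ∈ heList edges ↔ ∃ (k : Nat) (h : k < edges.length),
      he = (edges[k].1, edges[k].2, (k : Int)) ∨ he = (edges[k].2, edges[k].1, (k : Int)) := by
  simp only [heList, List.mem_flatMap, PySem.List.mem_enumerate_iff]
  constructor
  · rintro ⟨p, ⟨k, hk, rfl⟩, hp⟩
    simp only [List.mem_cons, List.not_mem_nil, or_false] at hp
    exact ⟨k, hk, by simpa using hp⟩
  · rintro ⟨k, hk, h⟩
    exact ⟨(0 + (k : Int), edges[k]), ⟨k, hk, rfl⟩, by simpa using h⟩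

theorem mem_incOf (edges : List (Int × Int)) (v x : Int) :
    x ∈ incOf edges v ↔ ∃ (k : Nat) (h : k < edges.length),
      x = (k : Int) ∧ (edges[k].1 = v ∨ edges[k].2 = v) := by
  simp only [incOf, incPairs, List.mem_map, List.mem_filter, List.mem_flatMap,
    PySem.List.mem_enumerate_iff]
  constructor
  · rintro ⟨q, ⟨⟨p, ⟨k, hk, rfl⟩, hq⟩, hqv⟩, rfl⟩
    simp only [List.mem_cons, List.not_mem_nil, or_false] at hq
    rcases hq with rfl | rfl
    · exact ⟨k, hk, by simpa using rfl, Or.inl (by simpa using hqv)⟩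
    · exact ⟨k, hk, by simpa using rfl, Or.inr (by simpa using hqv)⟩
  · rintro ⟨k, hk, rfl, h⟩
    rcases h with h | h
    · exact ⟨(edges[k].1, (k : Int)), ⟨⟨(0 + (k : Int), edges[k]), ⟨k, hk, rfl⟩, by simp⟩,
        by simpa using h⟩, by simp⟩
    · exact ⟨(edges[k].2, (k : Int)), ⟨⟨(0 + (k : Int), edges[k]), ⟨k, hk, rfl⟩, by simp⟩,
        by simpa using h⟩, by simp⟩

theorem length_heList (edges : List (Int × Int)) : (heList edges).length = 2 * edges.length := by
  induction edges using List.reverseRecOn with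
  | nil => rfl
  | append_singleton t x ih =>
    simp only [heList, PySem.List.enumerate_append, List.flatMap_append, List.length_append] at *
    simp [ih]
    omega

-- generic dict-fold lookup lemmas
theorem get?_foldl_insert_fun {κ ν : Type} [BEq κ] [LawfulBEq κ] [DecidableEq κ] (g : κ → ν) :
    ∀ (l : List κ) (d : PySem.Dict κ ν) (k : κ),
      (l.foldl (fun d x => d.insert x (g x)) d).get? k =
        if k ∈ l then some (g k) else d.get? k := by
  intro l
  induction l with
  | nil => intro d k; simp
  | cons x t ih =>
    intro d k
    simp only [List.foldl_cons, ih, PySem.Dict.get?_insert, List.mem_cons]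
    by_cases hkt : k ∈ t
    · simp [hkt]
    · by_cases hkx : k = x
      · simp [hkx]
      · simp [hkx, hkt]

theorem get?_foldl_insert_key_exists {κ ν α : Type} [BEq κ] [LawfulBEq κ] [DecidableEq κ]
    (key : α → κ) (val : α → ν) (k : κ) :
    ∀ (l : List α) (d : PySem.Dict κ ν), (∃ x ∈ l, key x = k) →
      ∃ x ∈ l, key x = k ∧
        (l.foldl (fun d a => d.insert (key a) (val a)) d).get? k = some (val x) := by
  intro l
  induction l using List.reverseRecOn with
  | nil => rintro d ⟨x, hx, -⟩; cases hx
  | append_singleton t x ih =>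
    intro d hex
    rw [List.foldl_append, List.foldl_cons, List.foldl_nil]
    by_cases hkx : key x = k
    · exact ⟨x, by simp, hkx, by rw [← hkx, PySem.Dict.get?_insert_self]⟩
    · have hext : ∃ y ∈ t, key y = k := by
        rcases hex with ⟨y, hy, hky⟩
        rcases List.mem_append.1 hy with h | h
        · exact ⟨y, h, hky⟩
        · simp only [List.mem_singleton] at h; subst h; exact absurd hky hkx
      rcases ih d hext with ⟨y, hy, hky, hval⟩
      refine ⟨y, List.mem_append.2 (Or.inl hy), hky, ?_⟩
      rw [PySem.Dict.get?_insert_of_ne _ _ (fun h => hkx h.symm)]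
      exact hval

-- the incident-edges dict computes incOf
theorem incident_getD (edges : List (Int × Int)) (verts : List Int) (v : Int) :
    (incident_edges edges verts).getD v [] = incOf edges v := by
  unfold incident_edges
  have h0 : (verts.foldl (fun d v => d.insert v ([] : List Int)) PySem.Dict.empty).getD v [] = [] := by
    rw [PySem.Dict.getD_eq_get?_getD, get?_foldl_insert_fun (fun _ => ([] : List Int))]
    split <;> simp
  have hre : ∀ (d : PySem.Dict Int (List Int)),
      (PySem.List.enumerate edges).foldl (fun inc p =>
        (inc.modify p.2.1 [] (fun l => l ++ [p.1])).modify p.2.2 [] (fun l => l ++ [p.1])) d =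
      (incPairs edges).foldl (fun d q => d.modify q.1 [] (fun l => l ++ [q.2])) d := by
    intro d
    rw [incPairs, List.foldl_flatMap]
    rfl
  rw [hre, PySem.Dict.getD_foldl_modify_append, h0, List.nil_append]
  rfl

-- under a good rotation the successor of a half-edge is a half-edge
theorem nextF_mem (edges : List (Int × Int)) (rotation : PySem.Dict Int (List Int))
    (hg : GoodRot edges rotation) (he : Int × Int × Int) (hhe : he ∈ heList edges) :
    nextF edges rotation he ∈ heList edges := by
  obtain ⟨rot, hget, hperm⟩ := hg he hhe
  obtain ⟨k, hk, hor⟩ := (mem_heList edges he).1 hhe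
  have hrotD : rotation.getD he.2.1 [] = rot := by
    rw [PySem.Dict.getD_eq_get?_getD, hget]; rfl
  have hrne : rot ≠ [] := by
    intro h
    have he2 : he.2.2 ∈ incOf edges he.2.1 := by
      rw [mem_incOf]
      rcases hor with h' | h' <;> rw [h'] <;> exact ⟨k, hk, rfl, by simp⟩
    rw [← hperm.mem_iff, h] at he2
    cases he2
  have hlen : (0 : Int) < (rot.length : Int) := by
    cases rot with
    | nil => exact absurd rfl hrne
    | cons a t => simp
  set idx := PySem.Int.mod
    ((((PySem.List.index? rot he.2.2).map Int.ofNat).getD 0) + 1) ((rot.length : Int)) with hidx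
  have hidx0 : 0 ≤ idx := Int.fmod_nonneg_of_pos _ hlen
  have hidxlt : idx < (rot.length : Int) := Int.fmod_lt_of_pos _ hlen
  have hidxn : idx.toNat < rot.length := by omega
  have hnget : PySem.List.pyGet? rot idx = some rot[idx.toNat] := by
    have h' : idx = ((idx.toNat : Nat) : Int) := by omega
    conv_lhs => rw [h']
    rw [PySem.List.pyGet?_natCast, List.getElem?_eq_getElem hidxn]
  have hnmem : rot[idx.toNat] ∈ rot := List.getElem_mem hidxn
  have hninc : rot[idx.toNat] ∈ incOf edges he.2.1 := hperm.mem_iff.1 hnmem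
  obtain ⟨j, hj, hje, hend⟩ := (mem_incOf edges he.2.1 _).1 hninc
  have hjget : PySem.List.pyGet? edges rot[idx.toNat] = some edges[j] := by
    rw [hje, PySem.List.pyGet?_natCast, List.getElem?_eq_getElem hj]
  show next_half_edge he.1 he.2.1 he.2.2 edges rotation ∈ heList edges
  unfold next_half_edge
  dsimp only
  rw [hrotD, ← hidx, hnget]
  simp only [Option.getD_some, hjget]
  by_cases hab : edges[j].1 = he.2.1
  · rw [if_pos hab, hje, mem_heList]
    exact ⟨j, hj, Or.inl (by rw [← hab])⟩
  · rw [if_neg hab, hje, mem_heList]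
    have h2 : edges[j].2 = he.2.1 := by tauto
    exact ⟨j, hj, Or.inr (by rw [← h2])⟩

-- the two face counters agree on every rotation the enumeration tests
theorem counts_eq (edges : List (Int × Int)) (verts : List Int)
    (rotation : PySem.Dict Int (List Int)) (hg : GoodRot edges rotation) :
    count_faces edges verts rotation = count_faces_b edges rotation := by
  set f := nextF edges rotation with hf
  set S := heList edges with hS
  set fuel := 2 * edges.length + 1 with hfuel
  have hcl : ∀ x ∈ S, f x ∈ S := fun x hx => nextF_mem edges rotation hg x hx
  have hddlen : (PySem.List.dedup S).length < fuel := by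
    have h1 : (PySem.List.dedup S).length ≤ S.length := by
      rw [PySem.List.dedup_eq_ofList]; exact PySem.Set.length_ofList_le S
    have h2 : S.length = 2 * edges.length := length_heList edges
    omega
  -- A's side: flatten the nested folds to a single fold over heList, then cspec
  have hA : count_faces edges verts rotation =
      (S.foldl (fun st he => if he ∈ st.1 then st else (pvWalk f fuel st.1 he, st.2 + 1))
        ((PySem.Set.empty : PySem.Set (Int × Int × Int)), (0 : Int))).2 := by
    unfold count_faces
    dsimp only
    rw [hS, heList, List.foldl_flatMap]
    congr 1
    apply PySem.List.foldl_congr_mem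
    intro acc p _
    simp only [List.foldl_cons, List.foldl_nil, walk_face_eq_pvWalk, hf, hfuel]
  have hclosed0 : ∀ x ∈ (PySem.Set.empty : PySem.Set (Int × Int × Int)), f x ∈
      (PySem.Set.empty : PySem.Set (Int × Int × Int)) := by
    intro x hx; cases hx
  have hinv0 : ∀ x : Int × Int × Int,
      x ∈ (PySem.Set.empty : PySem.Set (Int × Int × Int)) ↔
        ∃ p ∈ ([] : List (Int × Int × Int)), x ∈ pvWalk f fuel PySem.Set.empty p := by
    intro x
    constructor
    · intro h; cases h
    · rintro ⟨p, hp, -⟩; cases hp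
  rw [hA, a_fold_eq_cspec f S hcl fuel hddlen S [] PySem.Set.empty 0
    (fun x hx => hx) hclosed0 hinv0, zero_add]
  -- B's side
  unfold count_faces_b
  dsimp only
  rw [show ((PySem.List.enumerate edges).flatMap
      (fun p => [(p.2.1, p.2.2, p.1), (p.2.2, p.2.1, p.1)])) = S from rfl]
  have hmap : S.map (fun he => orbit_walk edges rotation (2 * edges.length + 1) PySem.Set.empty he)
      = S.map (fun p => pvWalk f fuel PySem.Set.empty p) := by
    apply List.map_congr_left
    intro x _
    rw [orbit_walk_eq_pvWalk, hf, hfuel]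
  rw [hmap]
  have hB := b_fold_eq_cspec (fun p => pvWalk f fuel PySem.Set.empty p) S S [] 0 rfl
  simp only [List.length_nil, Nat.cast_zero] at hB
  rw [hB, zero_add]

-- membership in itertools.product
theorem mem_pyProduct {α : Type} :
    ∀ (ls : List (List α)) (c : List α),
      c ∈ pyProduct ls ↔ List.Forall₂ (fun x l => x ∈ l) c ls := by
  intro ls
  induction ls with
  | nil =>
    intro c
    simp only [pyProduct, List.mem_singleton, List.forall₂_nil_right_iff]
  | cons l t ih =>
    intro c
    simp only [pyProduct, List.mem_flatMap, List.mem_map]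
    constructor
    · rintro ⟨x, hx, r, hr, rfl⟩
      exact List.Forall₂.cons hx ((ih r).1 hr)
    · intro h
      cases h with
      | cons hx hr => exact ⟨_, hx, _, (ih _).2 hr, rfl⟩

-- the representative cyclic rotations generated at a vertex
def repsOf (edges : List (Int × Int)) (verts : List Int) (v : Int) : List (List Int) :=
  (PySem.List.permutations ((incident_edges edges verts).getD v [])
      ((incident_edges edges verts).getD v []).length).filter
    (fun p => (PySem.List.pyGet? p 0).getD 0 ==
      (PySem.List.min? ((incident_edges edges verts).getD v []) (fun x => x)).getD 0)

theorem good_of_combo (edges : List (Int × Int)) (verts : List Int) (combo : List (List Int))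
    (h1 : ∀ e ∈ edges, e.1 ∈ verts ∧ e.2 ∈ verts)
    (hc : List.Forall₂ (fun x l => x ∈ l) combo (verts.map (repsOf edges verts))) :
    GoodRot edges ((PySem.List.pyRange 0 (verts.length : Int) 1).foldl (fun d i =>
      d.insert (PySem.List.pyGetD verts i 0) (PySem.List.pyGetD combo i []))
      PySem.Dict.empty) := by
  intro he hhe
  have htv : he.2.1 ∈ verts := by
    obtain ⟨k, hk, hor⟩ := (mem_heList edges he).1 hhe
    have := h1 edges[k] (List.getElem_mem hk)
    rcases hor with h | h <;> rw [h] <;> simp [this.1, this.2]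
  obtain ⟨j, hj, hvj⟩ := List.getElem_of_mem htv
  have hex : ∃ x ∈ PySem.List.pyRange 0 (verts.length : Int) 1,
      PySem.List.pyGetD verts x 0 = he.2.1 := by
    refine ⟨(j : Int), ?_, ?_⟩
    · rw [PySem.List.mem_pyRange_one]
      constructor <;> [omega; exact_mod_cast hj]
    · rw [PySem.List.pyGetD_natCast, List.getD_eq_getElem _ _ hj, hvj]
  obtain ⟨i, hi, hkey, hval⟩ := get?_foldl_insert_key_exists
    (fun i => PySem.List.pyGetD verts i 0) (fun i => PySem.List.pyGetD combo i []) he.2.1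
    (PySem.List.pyRange 0 (verts.length : Int) 1) PySem.Dict.empty hex
  rw [PySem.List.mem_pyRange_one] at hi
  have hclen : combo.length = verts.length := by
    have := hc.length_eq
    simpa using this
  set n := i.toNat with hn
  have hnv : n < verts.length := by omega
  have hnc : n < combo.length := by omega
  have hiv : i = ((n : Nat) : Int) := by omega
  have hcv : PySem.List.pyGetD combo i [] = combo[n] := by
    rw [hiv, PySem.List.pyGetD_natCast, List.getD_eq_getElem _ _ hnc]
  have hkv : verts[n] = he.2.1 := by
    rw [hiv, PySem.List.pyGetD_natCast, List.getD_eq_getElem _ _ hnv] at hkey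
    exact hkey
  have hmem : combo[n] ∈ repsOf edges verts he.2.1 := by
    have h2 := (List.forall₂_iff_get.1 hc).2 n hnc (by simpa using hnv)
    simp only [List.get_eq_getElem, List.getElem_map] at h2
    rwa [hkv] at h2
  have hperm : combo[n].Perm (incOf edges he.2.1) := by
    have h3 := List.mem_filter.1 hmem
    have h4 := PySem.List.perm_of_mem_permutations h3.1
    rwa [incident_getD] at h4
  exact ⟨combo[n], by rw [hval, hcv], hperm⟩

-- A's index-built rotation dict equals the zip-built one
theorem rot_build_eq (verts : List Int) (combo : List (List Int))
    (h : combo.length = verts.length) :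
    (PySem.List.pyRange 0 (verts.length : Int) 1).foldl (fun d i =>
        d.insert (PySem.List.pyGetD verts i 0) (PySem.List.pyGetD combo i []))
      PySem.Dict.empty =
    (verts.zip combo).foldl (fun d p => d.insert p.1 p.2) PySem.Dict.empty := by
  have hz : (verts.zip combo).length = verts.length := by
    rw [List.length_zip, h, Nat.min_self]
  have hcongr : (PySem.List.pyRange 0 (verts.length : Int) 1).foldl (fun d i =>
        d.insert (PySem.List.pyGetD verts i 0) (PySem.List.pyGetD combo i []))
      PySem.Dict.empty =
      (PySem.List.pyRange 0 (((verts.zip combo).length : Nat) : Int) 1).foldl (fun d i =>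
        d.insert (PySem.List.pyGetD (verts.zip combo) i ((0 : Int), ([] : List Int))).1
          (PySem.List.pyGetD (verts.zip combo) i ((0 : Int), ([] : List Int))).2)
      PySem.Dict.empty := by
    rw [hz]
    apply PySem.List.foldl_congr_mem
    intro d i hi
    rw [PySem.List.mem_pyRange_one] at hi
    have hi0 : 0 ≤ i := hi.1
    have hiv : i.toNat < verts.length := by omega
    have hic : i.toNat < combo.length := by omega
    have hizl : i.toNat < (verts.zip combo).length := by omega
    rw [PySem.List.pyGetD_eq_getElem _ _ hi0 (by push_cast; omega),
      PySem.List.pyGetD_eq_getElem _ _ hi0 (by push_cast; omega),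
      PySem.List.pyGetD_eq_getElem _ _ hi0 (by push_cast; omega),
      List.getElem_zip]
  rw [hcongr, PySem.List.foldl_pyRange_zero_pyGetD' (verts.zip combo)
    ((0 : Int), ([] : List Int)) (fun d p => d.insert p.1 p.2) PySem.Dict.empty]

-- the recursive assignment, expressed as a fold over the product of the reps lists
theorem b_assign_eq (edges : List (Int × Int)) (verts : List Int) (target_faces : Int) :
    ∀ (pairs : List (Int × List (List Int))) (rotation : PySem.Dict Int (List Int))
      (results : List ((List (Int × Int)) × List Int × (List (Int × List Int)))),
      b_assign edges verts target_faces pairs rotation results =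
      (pyProduct (pairs.map Prod.snd)).foldl (fun res combo =>
        let rot := ((pairs.map Prod.fst).zip combo).foldl (fun d p => d.insert p.1 p.2) rotation
        if count_faces_b edges rot == target_faces then
          res ++ [(edges, verts, rot.items)]
        else res) results := by
  intro pairs
  induction pairs with
  | nil =>
    intro rotation results
    simp [b_assign, pyProduct]
  | cons vp rest ih =>
    intro rotation results
    obtain ⟨v, reps⟩ := vp
    show reps.foldl (fun res rep =>
        b_assign edges verts target_faces rest (rotation.insert v rep) res) results = _
    simp only [List.map_cons, pyProduct, List.foldl_flatMap, List.foldl_map]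
    apply PySem.List.foldl_congr_mem
    intro res rep _
    rw [ih (rotation.insert v rep) res]
    apply PySem.List.foldl_congr_mem
    intro res' combo _
    simp only [List.zip_cons_cons, List.foldl_cons]

-- ===== VERDICT (by name: the statement is the Claim_ definition above) =====
theorem find_valid_rotations_py_spec : Claim_equal_find_valid_rotations_py := by
  unfold Claim_equal_find_valid_rotations_py
  intro edges verts target_faces _ hpre
  unfold Spec_find_valid_rotations_py
  unfold find_valid_rotations_py find_valid_rotations_py_alt
  dsimp only
  rw [show (verts.foldl (fun acc v =>
    let incv := (incident_edges edges verts).getD v []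
    let fixed_first := (PySem.List.min? incv (fun x => x)).getD 0
    let reps := (PySem.List.permutations incv incv.length).filter
      (fun p => (PySem.List.pyGet? p 0).getD 0 == fixed_first)
    acc ++ [reps]) []) = verts.foldl (fun acc v => acc ++ [repsOf edges verts v]) [] from rfl]
  set vp := verts.foldl (fun acc v => acc ++ [repsOf edges verts v]) [] with hvp
  have hvpmap : vp = verts.map (repsOf edges verts) := by
    rw [hvp, PySem.List.foldl_append_singleton_eq_map (repsOf edges verts) verts [],
      List.nil_append]
  have hvplen : vp.length = verts.length := by rw [hvpmap, List.length_map]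
  rw [b_assign_eq edges verts target_faces (verts.zip vp) PySem.Dict.empty [],
    List.map_snd_zip (by omega), List.map_fst_zip (by omega)]
  apply PySem.List.foldl_congr_mem
  intro res combo hcombo
  have hcombo' : List.Forall₂ (fun x l => x ∈ l) combo (verts.map (repsOf edges verts)) := by
    rw [← hvpmap]
    exact (mem_pyProduct _ _).1 hcombo
  have hclen : combo.length = verts.length := by
    have := hcombo'.length_eq
    simpa using this
  have hrot := rot_build_eq verts combo hclen
  have hg := good_of_combo edges verts combo hpre.1 hcombo'
  dsimp only
  rw [← hrot, counts_eq edges verts _ hg]
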